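-- pv_equiv track=rewrite | github.com/alfredholmes/abm_job_locations | Data Analysis/CH API Company migrations/results/get_yearly_migration_data.py | sum_migrations
-- ===== SOURCE A (Python) =====
-- def sum_migrations(data):
--     r = {}
--     for d in data:
--         if d[0] in r:
--             if d[1] in r[d[0]]:
--                 r[d[0]][d[1]] += 1
--             else:
--                 r[d[0]][d[1]] = 1
--         else:
--             r[d[0]] = {d[1]: 1}
--     return r
-- ===== SOURCE B (Python) =====
-- def sum_migrations(data):
--     # pass 1: flat pair -> count table
--     counts = {}
--     for d in data:
--         key = (d[0], d[1])
--         counts[key] = counts.get(key, 0) + 1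
--     # pass 2: reshape into the nested dict
--     r = {}
--     for (a, b), n in counts.items():
--         r.setdefault(a, {})[b] = n
--     return r
-- ===== Notes on version B (the rewrite author's own statement) =====
-- stated objective: alternative
-- what changed: A builds the nested dict in one branch-laden pass; B first builds a flat (origin,destination)->count table in one pass and then reshapes it into the nested dict in a second pass over the table.
import Mathlib
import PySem

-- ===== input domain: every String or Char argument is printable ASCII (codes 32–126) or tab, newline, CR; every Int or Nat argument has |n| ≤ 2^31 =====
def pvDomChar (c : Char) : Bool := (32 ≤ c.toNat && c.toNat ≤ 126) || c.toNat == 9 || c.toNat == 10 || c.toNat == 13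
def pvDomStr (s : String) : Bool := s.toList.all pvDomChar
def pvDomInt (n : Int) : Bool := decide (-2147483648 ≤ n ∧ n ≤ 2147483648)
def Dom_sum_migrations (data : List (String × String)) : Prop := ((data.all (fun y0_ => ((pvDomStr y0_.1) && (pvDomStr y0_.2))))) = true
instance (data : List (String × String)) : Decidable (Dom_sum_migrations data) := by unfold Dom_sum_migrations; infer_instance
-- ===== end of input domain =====

-- B replaces A's single branch-laden pass by a flat pair->count table built in one
-- pass and reshaped into the nested dict in a second pass (alternative decomposition).


-- ===== PORT A =====
-- one pass: r[d[0]][d[1]] += 1 with the three branches of the Python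
def sum_migrations (data : List (String × String)) : List (String × List (String × Int)) :=
  let r : PySem.Dict String (PySem.Dict String Int) :=
    data.foldl (fun r d =>
      if r.contains d.1 then
        if (r.getD d.1 PySem.Dict.empty).contains d.2 then
          r.insert d.1 ((r.getD d.1 PySem.Dict.empty).insert d.2
            ((r.getD d.1 PySem.Dict.empty).getD d.2 0 + 1))
        else
          r.insert d.1 ((r.getD d.1 PySem.Dict.empty).insert d.2 1)
      else
        r.insert d.1 (PySem.Dict.ofList [(d.2, 1)])) PySem.Dict.empty
  r.items.map (fun q => (q.1, q.2.items))

-- ===== PORT B =====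
-- pass 1: flat (d[0], d[1]) -> count table; pass 2: reshape via r.setdefault(a, {})[b] = n
def sum_migrations_alt (data : List (String × String)) : List (String × List (String × Int)) :=
  let counts : PySem.Dict (String × String) Int :=
    data.foldl (fun c d => c.insert (d.1, d.2) (c.getD (d.1, d.2) 0 + 1)) PySem.Dict.empty
  let r : PySem.Dict String (PySem.Dict String Int) :=
    counts.items.foldl (fun r p =>
      r.modify p.1.1 PySem.Dict.empty (fun inn => inn.insert p.1.2 p.2)) PySem.Dict.empty
  r.items.map (fun q => (q.1, q.2.items))

-- ===== PRECONDITION & SPEC =====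
def Spec_sum_migrations (data : List (String × String)) (out : List (String × List (String × Int))) : Prop := out = sum_migrations_alt data
instance (data : List (String × String)) (out : List (String × List (String × Int))) : Decidable (Spec_sum_migrations data out) := by unfold Spec_sum_migrations; infer_instance

-- ===== CLAIM (what is proved, stated in full; the proofs are below) =====
def Claim_equal_sum_migrations : Prop := ∀ (data : List (String × String)), Dom_sum_migrations data → Spec_sum_migrations data (sum_migrations data)

-- ===== LEMMAS AND PROOFS =====

-- step function of A's pass, written branch-free (proved equal to the ported branches)
def pvSA (r : PySem.Dict String (PySem.Dict String Int)) (d : String × String) :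
    PySem.Dict String (PySem.Dict String Int) :=
  r.insert d.1 ((r.getD d.1 PySem.Dict.empty).insert d.2
    ((r.getD d.1 PySem.Dict.empty).getD d.2 0 + 1))

def pvSB (r : PySem.Dict String (PySem.Dict String Int)) (p : (String × String) × Int) :
    PySem.Dict String (PySem.Dict String Int) :=
  r.modify p.1.1 PySem.Dict.empty (fun inn => inn.insert p.1.2 p.2)

theorem pvstepA_eq :
    (fun (r : PySem.Dict String (PySem.Dict String Int)) (d : String × String) =>
      if r.contains d.1 then
        if (r.getD d.1 PySem.Dict.empty).contains d.2 then
          r.insert d.1 ((r.getD d.1 PySem.Dict.empty).insert d.2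
            ((r.getD d.1 PySem.Dict.empty).getD d.2 0 + 1))
        else
          r.insert d.1 ((r.getD d.1 PySem.Dict.empty).insert d.2 1)
      else
        r.insert d.1 (PySem.Dict.ofList [(d.2, 1)])) = pvSA := by
  funext r d
  unfold pvSA
  by_cases h1 : r.contains d.1
  · simp only [h1, if_true]
    by_cases h2 : (r.getD d.1 PySem.Dict.empty).contains d.2
    · simp [h2]
    · simp only [Bool.not_eq_true] at h2
      rw [if_neg (by simp [h2]), PySem.Dict.getD_of_not_contains _ _ h2, zero_add]
  · simp only [Bool.not_eq_true] at h1
    rw [if_neg (by simp [h1]), PySem.Dict.getD_of_not_contains _ _ h1,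
      PySem.Dict.getD_empty]
    rfl

theorem pv_getD_A (a : String) :
    ∀ (l : List (String × String)) (r : PySem.Dict String (PySem.Dict String Int)),
    (l.foldl pvSA r).getD a PySem.Dict.empty =
      ((l.filter (fun d => d.1 == a)).map (·.2)).foldl
        (fun inn b => inn.insert b (inn.getD b 0 + 1)) (r.getD a PySem.Dict.empty)
  | [], r => rfl
  | d :: l, r => by
    rw [List.foldl_cons, pv_getD_A a l (pvSA r d)]
    by_cases h : d.1 = a
    · simp [pvSA, h]
    · simp [pvSA, h, PySem.Dict.getD_insert, Ne.symm h]

theorem pv_getD_B (a : String) :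
    ∀ (l : List ((String × String) × Int)) (r : PySem.Dict String (PySem.Dict String Int)),
    (l.foldl pvSB r).getD a PySem.Dict.empty =
      (l.filter (fun p => p.1.1 == a)).foldl
        (fun inn p => inn.insert p.1.2 p.2) (r.getD a PySem.Dict.empty)
  | [], r => rfl
  | p :: l, r => by
    rw [List.foldl_cons, pv_getD_B a l (pvSB r p)]
    by_cases h : p.1.1 = a
    · simp [pvSB, h]
    · simp [pvSB, h, PySem.Dict.getD_modify, Ne.symm h]

theorem pv_ofList_map_ofList {α β : Type} [BEq α] [LawfulBEq α] [BEq β] [LawfulBEq β]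
    (f : α → β) (xs : List α) :
    PySem.Set.ofList ((PySem.Set.ofList xs).map f) = PySem.Set.ofList (xs.map f) := by
  induction xs using List.reverseRecOn with
  | nil => rfl
  | append_singleton xs x ih =>
    rw [PySem.Set.ofList_append_singleton]
    by_cases hx : x ∈ xs
    · rw [PySem.Set.add_of_mem (by rwa [PySem.Set.mem_ofList]), ih, List.map_append,
        List.map_singleton, PySem.Set.ofList_append_singleton,
        PySem.Set.add_of_mem (by rw [PySem.Set.mem_ofList]; exact List.mem_map_of_mem hx)]
    · rw [PySem.Set.add_of_not_mem (by rwa [PySem.Set.mem_ofList]), List.map_append,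
        List.map_singleton, PySem.Set.ofList_append_singleton, ih, List.map_append,
        List.map_singleton, PySem.Set.ofList_append_singleton]

theorem pv_filterSet (a : String) (xs : List (String × String)) :
    ((PySem.Set.ofList xs).filter (fun k => k.1 == a)).map (·.2) =
      PySem.Set.ofList ((xs.filter (fun d => d.1 == a)).map (·.2)) := by
  induction xs using List.reverseRecOn with
  | nil => rfl
  | append_singleton xs x ih =>
    rw [PySem.Set.ofList_append_singleton, List.filter_append, List.filter_singleton]
    by_cases ha : x.1 = a
    · rw [show (x.1 == a) = true by simp [ha], cond_true,
        List.map_append, List.map_singleton, PySem.Set.ofList_append_singleton]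
      by_cases hx : x ∈ xs
      · have hmem : x.2 ∈ PySem.Set.ofList ((xs.filter (fun d => d.1 == a)).map (·.2)) := by
          rw [PySem.Set.mem_ofList]
          exact List.mem_map_of_mem (List.mem_filter.mpr ⟨hx, by simp [ha]⟩)
        rw [PySem.Set.add_of_mem (by rwa [PySem.Set.mem_ofList]),
          PySem.Set.add_of_mem hmem, ih]
      · have hnm : x.2 ∉ PySem.Set.ofList ((xs.filter (fun d => d.1 == a)).map (·.2)) := by
          rw [PySem.Set.mem_ofList]
          intro hm
          obtain ⟨d, hd, hd2⟩ := List.mem_map.mp hm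
          obtain ⟨hdx, hda⟩ := List.mem_filter.mp hd
          apply hx
          have hde : d = x := Prod.ext (by simp_all) hd2
          rwa [← hde]
        rw [PySem.Set.add_of_not_mem (by rwa [PySem.Set.mem_ofList]),
          PySem.Set.add_of_not_mem hnm, List.filter_append, List.filter_singleton,
          show (x.1 == a) = true by simp [ha], cond_true,
          List.map_append, List.map_singleton, ih]
    · rw [show (x.1 == a) = false by simp [ha], cond_false,
        List.append_nil]
      by_cases hx : x ∈ xs
      · rw [PySem.Set.add_of_mem (by rwa [PySem.Set.mem_ofList]), ih]
      · rw [PySem.Set.add_of_not_mem (by rwa [PySem.Set.mem_ofList]), List.filter_append,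
          List.filter_singleton,
          show (x.1 == a) = false by simp [ha], cond_false,
          List.append_nil, ih]

theorem pv_count (a b : String) (xs : List (String × String)) :
    xs.count (a, b) = ((xs.filter (fun d => d.1 == a)).map (·.2)).count b := by
  induction xs with
  | nil => rfl
  | cons d xs ih =>
    rw [List.count_cons, List.filter_cons]
    by_cases ha : d.1 = a
    · simp only [show (d.1 == a) = true by simp [ha], if_true, List.map_cons,
        List.count_cons, ih]
      congr 1
      by_cases hb : d.2 = b
      · simp [Prod.ext_iff, ha, hb]
      · simp [Prod.ext_iff, hb]
    · simp only [show (d.1 == a) = false by simp [ha], Bool.false_eq_true, if_false, ih]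
      have hne : (d == (a, b)) = false := by simp [Prod.ext_iff, ha]
      simp [hne]

theorem pv_inner_items (data : List (String × String)) (a : String) :
    ((data.foldl pvSA PySem.Dict.empty).getD a PySem.Dict.empty).items =
    (((PySem.Dict.counter data).items.foldl pvSB PySem.Dict.empty).getD a
      PySem.Dict.empty).items := by
  rw [pv_getD_A a data PySem.Dict.empty, pv_getD_B a (PySem.Dict.counter data).items
    PySem.Dict.empty, PySem.Dict.getD_empty,
    PySem.Dict.foldl_insert_getD_add_one_eq_counter, PySem.Dict.items_counter,
    PySem.Dict.items_counter, List.filter_map]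
  have hcomp : ((fun (p : (String × String) × Int) => p.1.1 == a) ∘
      (fun (k : String × String) => (k, (data.count k : Int)))) = fun k => k.1 == a := rfl
  rw [hcomp]
  have hnd : (List.map (fun (p : (String × String) × Int) => p.1.2)
      (((PySem.Set.ofList data).filter (fun k => k.1 == a)).map
        (fun k => (k, (data.count k : Int))))).Nodup := by
    rw [List.map_map]
    have : ((fun (p : (String × String) × Int) => p.1.2) ∘
        (fun (k : String × String) => (k, (data.count k : Int)))) =
        (fun (k : String × String) => k.2) := rfl
    rw [this, pv_filterSet]
    exact PySem.Set.nodup_ofList _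
  rw [PySem.Dict.items_foldl_insert_fresh _ _ _ _
    (fun p _ => PySem.Dict.contains_empty _) hnd]
  rw [show (PySem.Dict.empty : PySem.Dict String Int).items = [] from rfl, List.nil_append,
    List.map_map, ← pv_filterSet a data, List.map_map]
  apply List.map_congr_left
  intro k hk
  obtain ⟨hk1, hk2⟩ := List.mem_filter.mp hk
  have hka : k.1 = a := by simpa using hk2
  have : k = (a, k.2) := Prod.ext hka rfl
  simp only [Function.comp]
  rw [this, pv_count a k.2 data]

theorem pv_nodupA (data : List (String × String)) :
    (data.foldl pvSA PySem.Dict.empty).keys.Nodup := by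
  have h := PySem.Dict.nodup_keys_foldl_insert_key data (fun d => d.1)
    (fun r d => (r.getD d.1 PySem.Dict.empty).insert d.2
      ((r.getD d.1 PySem.Dict.empty).getD d.2 0 + 1))
    (PySem.Dict.empty : PySem.Dict String (PySem.Dict String Int))
    (by rw [PySem.Dict.keys_empty]; exact List.nodup_nil)
  exact h

theorem pv_nodupB (data : List (String × String)) :
    (((PySem.Dict.counter data).items.foldl pvSB PySem.Dict.empty)).keys.Nodup := by
  have h := PySem.Dict.nodup_keys_foldl_modify_key (PySem.Dict.counter data).items
    (fun p => p.1.1) PySem.Dict.empty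
    (fun _ p inn => inn.insert p.1.2 p.2)
    (PySem.Dict.empty : PySem.Dict String (PySem.Dict String Int))
    (by rw [PySem.Dict.keys_empty]; exact List.nodup_nil)
  exact h

theorem pv_keys_eq (data : List (String × String)) :
    (data.foldl pvSA PySem.Dict.empty).keys =
    (((PySem.Dict.counter data).items.foldl pvSB PySem.Dict.empty)).keys := by
  have hA := PySem.Dict.keys_foldl_insert_key data (fun d => d.1)
    (fun r d => (r.getD d.1 PySem.Dict.empty).insert d.2
      ((r.getD d.1 PySem.Dict.empty).getD d.2 0 + 1))
    (PySem.Dict.empty : PySem.Dict String (PySem.Dict String Int))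
  have hB := PySem.Dict.keys_foldl_modify_key (PySem.Dict.counter data).items
    (fun p => p.1.1) PySem.Dict.empty
    (fun _ p inn => inn.insert p.1.2 p.2)
    (PySem.Dict.empty : PySem.Dict String (PySem.Dict String Int))
  have hA' : (data.foldl pvSA PySem.Dict.empty).keys =
      PySem.Set.update (PySem.Dict.empty :
        PySem.Dict String (PySem.Dict String Int)).keys (data.map (fun d => d.1)) := hA
  have hB' : ((PySem.Dict.counter data).items.foldl pvSB PySem.Dict.empty).keys =
      PySem.Set.update (PySem.Dict.empty :
        PySem.Dict String (PySem.Dict String Int)).keys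
        ((PySem.Dict.counter data).items.map (fun p => p.1.1)) := hB
  rw [hA', hB', PySem.Dict.keys_empty, PySem.Set.update_nil_left, PySem.Set.update_nil_left,
    PySem.Dict.items_counter, List.map_map]
  rw [show ((fun (p : (String × String) × Int) => p.1.1) ∘
      (fun (k : String × String) => (k, (data.count k : Int)))) =
      (fun (k : String × String) => k.1) from rfl]
  rw [pv_ofList_map_ofList]

theorem pv_main (data : List (String × String)) :
    sum_migrations data = sum_migrations_alt data := by
  simp only [sum_migrations, sum_migrations_alt]
  rw [pvstepA_eq]
  have hc : data.foldl (fun (c : PySem.Dict (String × String) Int) (d : String × String) =>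
      c.insert (d.1, d.2) (c.getD (d.1, d.2) 0 + 1)) PySem.Dict.empty =
      PySem.Dict.counter data := by
    rw [show (fun (c : PySem.Dict (String × String) Int) (d : String × String) =>
        c.insert (d.1, d.2) (c.getD (d.1, d.2) 0 + 1)) =
        (fun c d => c.insert d (c.getD d 0 + 1)) from
      funext fun c => funext fun d => by rw [Prod.mk.eta]]
    exact PySem.Dict.foldl_insert_getD_add_one_eq_counter data
  rw [hc, show (fun (r : PySem.Dict String (PySem.Dict String Int))
      (p : (String × String) × Int) =>
      r.modify p.1.1 PySem.Dict.empty fun inn => inn.insert p.1.2 p.2) = pvSB from rfl]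
  rw [PySem.Dict.items_eq_map_keys _ (pv_nodupA data) PySem.Dict.empty,
    PySem.Dict.items_eq_map_keys _ (pv_nodupB data) PySem.Dict.empty,
    pv_keys_eq data, List.map_map, List.map_map]
  apply List.map_congr_left
  intro a _
  simp only [Function.comp]
  exact congrArg (fun l => (a, l)) (pv_inner_items data a)

-- ===== VERDICT (by name: the statement is the Claim_ definition above) =====
theorem sum_migrations_spec : Claim_equal_sum_migrations :=
  fun data _ => pv_main data
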